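-- pv_equiv track=rewrite | github.com/SanjaMarceta/Reverse-Game | reverse.py | applay_to_board_bottom
-- ===== SOURCE A (Python) =====
-- def applay_to_board_bottom(board,player,i,j):
--     br = 0
--     i+=1
--     k = i
--     while k < (len(board)) and board[k][j] != player and board[k][j] != '~':
--         k+=1
--     if  k < (len(board)) and board[k][j] == player:
--         while i < (len(board)) and board[i][j] != player and board[i][j] != '~':
--             board[i][j] = player
--             i += 1
--             br += 1
--     return br
-- ===== SOURCE B (Python) =====
-- def applay_to_board_bottom(board, player, i, j):
--     # Single downward pass: collect the bracketed run, commit only if closed by player.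
--     run = []
--     k = i + 1
--     while k < len(board):
--         c = board[k][j]
--         if c == player:
--             for r in run:
--                 board[r][j] = player
--             return len(run)
--         if c == '~':
--             return 0
--         run.append(k)
--         k += 1
--     return 0
-- ===== Notes on version B (the rewrite author's own statement) =====
-- stated objective: simpler
-- what changed: B makes a single downward pass that records the run of candidate row indices and commits the flips only once the run is confirmed closed by a player cell, instead of A's two sequential scans (one to find the bracket, one to re-walk and flip while re-reading mutated cells).
-- outside the precondition, e.g. on applay_to_board_bottom([['x'], ['p']], 'p', -3, 0): A returns 1, B returns 1; on applay_to_board_bottom([['p'], []], 'p', -1, 0): A returns 0, B returns 0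
import Mathlib
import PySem

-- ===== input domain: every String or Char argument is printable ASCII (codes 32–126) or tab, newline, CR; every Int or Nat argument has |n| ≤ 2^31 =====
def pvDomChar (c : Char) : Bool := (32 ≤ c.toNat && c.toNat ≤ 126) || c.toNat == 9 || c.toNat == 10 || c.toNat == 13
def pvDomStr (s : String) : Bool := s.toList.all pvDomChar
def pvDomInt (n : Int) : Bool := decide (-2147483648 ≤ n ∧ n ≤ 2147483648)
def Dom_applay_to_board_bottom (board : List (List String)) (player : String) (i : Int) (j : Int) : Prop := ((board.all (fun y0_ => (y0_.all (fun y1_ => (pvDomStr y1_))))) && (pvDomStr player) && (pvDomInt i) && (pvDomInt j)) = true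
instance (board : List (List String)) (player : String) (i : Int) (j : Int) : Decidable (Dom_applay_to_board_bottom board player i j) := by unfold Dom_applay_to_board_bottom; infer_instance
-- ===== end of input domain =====

-- B makes one downward pass collecting the run and commits flips only once the run is
-- confirmed closed by a player cell, instead of A's two sequential scans (objective:
-- simpler). Both Pythons mutate `board` identically; the equivalence proved here is
-- about the RETURN value.

-- ===== PORT A =====
-- board[k][j] as Python reads it (none = IndexError; such inputs are outside Pre_)
def cellAt (board : List (List String)) (j k : Int) : Option String :=
  (PySem.List.pyGet? board k).bind (fun row => PySem.List.pyGet? row j)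

-- board[k][j] = v (Python raises on an invalid index; outside Pre_ the board is returned unchanged)
def setCell (board : List (List String)) (k j : Int) (v : String) : List (List String) :=
  match PySem.List.pyGet? board k with
  | none => board
  | some row => PySem.List.pySetD board k (PySem.List.pySetD row j v)

-- A's first while loop: advance k while k < len(board) and board[k][j] is neither player
-- nor '~'.  The loop runs structurally on a fuel counter; `board.length` fuel is enough
-- for every start index k ≥ 0 (each step increments k, and the loop stops at k = len).
def aScan (board : List (List String)) (player : String) (j : Int) : Nat → Int → Int
  | 0, k => k
  | fuel + 1, k =>
    if k < (board.length : Int) then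
      match cellAt board j k with
      | none => k                    -- Python raises here; outside Pre_
      | some c => if c = player ∨ c = "~" then k else aScan board player j fuel (k + 1)
    else k

-- A's second while loop: flip and count, re-reading the (mutated) board as Python does
def aFlip (board : List (List String)) (player : String) (j : Int) : Nat → Int → Int → Int
  | 0, _, br => br
  | fuel + 1, i, br =>
    if i < (board.length : Int) then
      match cellAt board j i with
      | none => br                   -- Python raises here; outside Pre_
      | some c =>
        if c = player ∨ c = "~" then br
        else aFlip (setCell board i j player) player j fuel (i + 1) (br + 1)
    else br

def applay_to_board_bottom (board : List (List String)) (player : String) (i : Int) (j : Int) : Int :=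
  if aScan board player j board.length (i + 1) < (board.length : Int) ∧
      cellAt board j (aScan board player j board.length (i + 1)) = some player
  then aFlip board player j board.length (i + 1) 0
  else 0

-- ===== PORT B =====
-- B's single while loop: collect the run of candidate rows; on a player cell commit the
-- flips (the committed board is not part of the return value) and return len(run).
-- Same fuel discipline as the loops of port A.
def bLoop (board : List (List String)) (player : String) (j : Int) : Nat → Int → List Int → Int
  | 0, _, _ => 0
  | fuel + 1, k, run =>
    if k < (board.length : Int) then
      match cellAt board j k with
      | none => 0                    -- Python raises here; outside Pre_
      | some c =>
        if c = player then
          let _bd := run.foldl (fun acc r => setCell acc r j player) board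
          (run.length : Int)
        else if c = "~" then 0
        else bLoop board player j fuel (k + 1) (run ++ [k])
    else 0

def applay_to_board_bottom_alt (board : List (List String)) (player : String) (i : Int) (j : Int) : Int :=
  bLoop board player j board.length (i + 1) []

-- ===== PRECONDITION & SPEC =====
-- Pre_ excludes (a) start rows i < -1, where Python's negative-index wraparound re-reads
-- rows the mutating second loop may alias — an accident of indexing on which A still
-- returns — and (b) boards where column j is invalid in some row below i, even when A
-- stops before reaching it; on all excluded inputs where both programs return they
-- return the same value (see cites).
def Pre_applay_to_board_bottom (board : List (List String)) (player : String) (i : Int) (j : Int) : Prop :=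
  -1 ≤ i ∧ ∀ row ∈ board.drop (i + 1).toNat, (-(row.length : Int) ≤ j ∧ j < (row.length : Int))
instance (board : List (List String)) (player : String) (i : Int) (j : Int) : Decidable (Pre_applay_to_board_bottom board player i j) := by unfold Pre_applay_to_board_bottom; infer_instance

def pvWitness_applay_to_board_bottom : List (List String) × String × Int × Int := ([["q"], ["p"]], "p", -1, 0)

def Spec_applay_to_board_bottom (board : List (List String)) (player : String) (i : Int) (j : Int) (out : Int) : Prop := out = applay_to_board_bottom_alt board player i j
instance (board : List (List String)) (player : String) (i : Int) (j : Int) (out : Int) : Decidable (Spec_applay_to_board_bottom board player i j out) := by unfold Spec_applay_to_board_bottom; infer_instance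

-- ===== CLAIM (what is proved, stated in full; the proofs are below) =====
def Claim_equal_applay_to_board_bottom : Prop := ∀ (board : List (List String)) (player : String) (i : Int) (j : Int), Dom_applay_to_board_bottom board player i j → Pre_applay_to_board_bottom board player i j → Spec_applay_to_board_bottom board player i j (applay_to_board_bottom board player i j)

-- ===== LEMMAS AND PROOFS =====

theorem pvWitness_ok :
    Dom_applay_to_board_bottom (pvWitness_applay_to_board_bottom.1) (pvWitness_applay_to_board_bottom.2.1) (pvWitness_applay_to_board_bottom.2.2.1) (pvWitness_applay_to_board_bottom.2.2.2) ∧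
    Pre_applay_to_board_bottom (pvWitness_applay_to_board_bottom.1) (pvWitness_applay_to_board_bottom.2.1) (pvWitness_applay_to_board_bottom.2.2.1) (pvWitness_applay_to_board_bottom.2.2.2) := by
  decide

theorem setCell_length (board : List (List String)) (k j : Int) (v : String) :
    (setCell board k j v).length = board.length := by
  unfold setCell
  cases PySem.List.pyGet? board k with
  | none => rfl
  | some row => simp [PySem.List.length_pySetD]

theorem cellAt_setCell_ne (board : List (List String)) (t j m : Int) (v : String)
    (ht : 0 ≤ t) (hm : 0 ≤ m) (hne : t ≠ m) :
    cellAt (setCell board t j v) j m = cellAt board j m := by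
  unfold setCell
  cases hrow : PySem.List.pyGet? board t with
  | none => rfl
  | some row =>
    dsimp only
    unfold cellAt
    congr 1
    rw [PySem.List.pySetD_of_nonneg _ _ ht,
        PySem.List.pyGet?_of_nonneg _ hm, PySem.List.pyGet?_of_nonneg _ hm]
    apply List.getElem?_set_ne
    omega

theorem aScan_of_ge (board : List (List String)) (player : String) (j : Int) (fuel : Nat)
    (k : Int) (h : (board.length : Int) ≤ k) : aScan board player j fuel k = k := by
  cases fuel with
  | zero => rfl
  | succ fuel => rw [aScan, if_neg (by omega)]

theorem aScan_stop (board : List (List String)) (player : String) (j : Int) (fuel : Nat)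
    (k : Int) (c : String) (hk : k < (board.length : Int)) (hc : cellAt board j k = some c)
    (hs : c = player ∨ c = "~") : aScan board player j (fuel + 1) k = k := by
  rw [aScan, if_pos hk, hc]
  simp [hs]

theorem aScan_step (board : List (List String)) (player : String) (j : Int) (fuel : Nat)
    (k : Int) (c : String) (hk : k < (board.length : Int)) (hc : cellAt board j k = some c)
    (hs : ¬ (c = player ∨ c = "~")) :
    aScan board player j (fuel + 1) k = aScan board player j fuel (k + 1) := by
  rw [aScan, if_pos hk, hc]
  simp [hs]

theorem aScan_ge (board : List (List String)) (player : String) (j : Int) :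
    ∀ (fuel : Nat) (k : Int), k ≤ aScan board player j fuel k := by
  intro fuel
  induction fuel with
  | zero => intro k; exact le_refl k
  | succ fuel ih =>
    intro k
    by_cases hk : k < (board.length : Int)
    · cases hc : cellAt board j k with
      | none => rw [aScan, if_pos hk, hc]
      | some c =>
        by_cases hs : c = player ∨ c = "~"
        · rw [aScan_stop _ _ _ _ _ c hk hc hs]
        · rw [aScan_step _ _ _ _ _ c hk hc hs]
          have := ih (k + 1)
          omega
    · rw [aScan_of_ge _ _ _ _ _ (by omega)]

theorem aScan_setCell (board : List (List String)) (player : String) (j t : Int) (v : String)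
    (ht : 0 ≤ t) :
    ∀ (fuel : Nat) (k : Int), t < k →
      aScan (setCell board t j v) player j fuel k = aScan board player j fuel k := by
  intro fuel
  induction fuel with
  | zero => intro k _; rfl
  | succ fuel ih =>
    intro k htk
    have hlen : ((setCell board t j v).length : Int) = (board.length : Int) := by
      rw [setCell_length]
    by_cases hk : k < (board.length : Int)
    · have hc' : ∀ c?, cellAt board j k = c? → cellAt (setCell board t j v) j k = c? := by
        intro c? hc
        rw [cellAt_setCell_ne _ _ _ _ _ ht (by omega) (by omega)]
        exact hc
      cases hc : cellAt board j k with
      | none =>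
        rw [aScan, if_pos (show k < ((setCell board t j v).length : Int) by omega),
            hc' none hc, aScan, if_pos hk, hc]
      | some c =>
        by_cases hs : c = player ∨ c = "~"
        · rw [aScan_stop _ _ _ _ _ c hk hc hs,
              aScan_stop _ _ _ _ _ c (by omega) (hc' (some c) hc) hs]
        · rw [aScan_step _ _ _ _ _ c hk hc hs,
              aScan_step _ _ _ _ _ c (by omega) (hc' (some c) hc) hs]
          exact ih (k + 1) (by omega)
    · rw [aScan_of_ge _ _ _ _ _ (by omega), aScan_of_ge _ _ _ _ _ (by omega)]

theorem aFlip_eq (player : String) (j : Int) :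
    ∀ (fuel : Nat) (board : List (List String)) (k br : Int),
    0 ≤ k →
    ((board.length : Int) - k).toNat ≤ fuel →
    (∀ m, k ≤ m → m < (board.length : Int) → cellAt board j m ≠ none) →
    aScan board player j fuel k < (board.length : Int) →
    cellAt board j (aScan board player j fuel k) = some player →
    aFlip board player j fuel k br = br + (aScan board player j fuel k - k) := by
  intro fuel
  induction fuel with
  | zero =>
    intro board k br _ hsuf _ hlt _
    have : (board.length : Int) ≤ k := by omega
    simp only [aScan] at hlt
    omega
  | succ fuel ih =>
    intro board k br hk0 hsuf hvalid hlt hstop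
    by_cases hk : k < (board.length : Int)
    · obtain ⟨c, hc⟩ : ∃ c, cellAt board j k = some c := by
        cases hcc : cellAt board j k with
        | none => exact absurd hcc (hvalid k (le_refl k) hk)
        | some c => exact ⟨c, rfl⟩
      by_cases hs : c = player ∨ c = "~"
      · have hsc : aScan board player j (fuel + 1) k = k := aScan_stop _ _ _ _ _ c hk hc hs
        rw [aFlip, if_pos hk, hc]
        dsimp only
        rw [if_pos hs, hsc]
        omega
      · have hsc : aScan board player j (fuel + 1) k = aScan board player j fuel (k + 1) :=
          aScan_step _ _ _ _ _ c hk hc hs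
        rw [aFlip, if_pos hk, hc]
        dsimp only
        rw [if_neg hs]
        set board' := setCell board k j player with hb'
        have hlen : board'.length = board.length := setCell_length _ _ _ _
        have hsc' : aScan board' player j fuel (k + 1) = aScan board player j fuel (k + 1) :=
          aScan_setCell board player j k player hk0 fuel (k + 1) (by omega)
        have hge1 : k + 1 ≤ aScan board player j fuel (k + 1) := aScan_ge _ _ _ _ _
        have hvalid' : ∀ m, k + 1 ≤ m → m < (board'.length : Int) → cellAt board' j m ≠ none := by
          intro m h1 h2
          rw [cellAt_setCell_ne _ _ _ _ _ hk0 (by omega) (by omega)]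
          exact hvalid m (by omega) (by omega)
        have := ih board' (k + 1) (br + 1) (by omega) (by rw [hlen]; omega) hvalid'
          (by rw [hsc', hlen]; omega)
          (by rw [hsc', cellAt_setCell_ne _ _ _ _ _ hk0 (by omega) (by omega)]
              · rw [← hsc]; exact hstop)
        rw [this, hsc', hsc]
        omega
    · rw [aScan_of_ge _ _ _ _ _ (by omega)] at hlt
      omega

theorem bLoop_eq (player : String) (j : Int) :
    ∀ (fuel : Nat) (board : List (List String)) (k : Int) (run : List Int),
    0 ≤ k →
    ((board.length : Int) - k).toNat ≤ fuel →
    (∀ m, k ≤ m → m < (board.length : Int) → cellAt board j m ≠ none) →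
    bLoop board player j fuel k run =
      if aScan board player j fuel k < (board.length : Int) ∧
          cellAt board j (aScan board player j fuel k) = some player
      then (run.length : Int) + (aScan board player j fuel k - k)
      else 0 := by
  intro fuel
  induction fuel with
  | zero =>
    intro board k run _ hsuf _
    have : (board.length : Int) ≤ k := by omega
    simp only [aScan, bLoop]
    rw [if_neg (by omega)]
  | succ fuel ih =>
    intro board k run hk0 hsuf hvalid
    by_cases hk : k < (board.length : Int)
    · obtain ⟨c, hc⟩ : ∃ c, cellAt board j k = some c := by
        cases hcc : cellAt board j k with
        | none => exact absurd hcc (hvalid k (le_refl k) hk)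
        | some c => exact ⟨c, rfl⟩
      by_cases hp : c = player
      · have hsc : aScan board player j (fuel + 1) k = k :=
          aScan_stop _ _ _ _ _ c hk hc (Or.inl hp)
        rw [bLoop, if_pos hk, hc]
        dsimp only
        rw [if_pos hp, hsc, if_pos ⟨hk, by rw [hc, hp]⟩]
        omega
      · by_cases ht : c = "~"
        · have hsc : aScan board player j (fuel + 1) k = k :=
            aScan_stop _ _ _ _ _ c hk hc (Or.inr ht)
          rw [bLoop, if_pos hk, hc]
          dsimp only
          rw [if_neg hp, if_pos ht, hsc,
              if_neg (by rintro ⟨-, h2⟩; rw [hc] at h2; exact hp (Option.some.inj h2))]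
        · have hs : ¬ (c = player ∨ c = "~") := by tauto
          have hsc : aScan board player j (fuel + 1) k = aScan board player j fuel (k + 1) :=
            aScan_step _ _ _ _ _ c hk hc hs
          rw [bLoop, if_pos hk, hc]
          dsimp only
          rw [if_neg hp, if_neg ht]
          rw [ih board (k + 1) (run ++ [k]) (by omega) (by omega)
                (fun m h1 h2 => hvalid m (by omega) h2)]
          rw [← hsc]
          by_cases hcond : aScan board player j (fuel + 1) k < (board.length : Int) ∧
              cellAt board j (aScan board player j (fuel + 1) k) = some player
          · rw [if_pos hcond, if_pos hcond]
            have : k + 1 ≤ aScan board player j fuel (k + 1) := aScan_ge _ _ _ _ _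
            simp only [List.length_append, List.length_cons, List.length_nil]
            push_cast
            omega
          · rw [if_neg hcond, if_neg hcond]
    · simp only [bLoop]
      rw [if_neg (by omega), aScan_of_ge _ _ _ _ _ (by omega), if_neg (by omega)]

-- ===== VERDICT (by name: the statement is the Claim_ definition above) =====
theorem applay_to_board_bottom_spec : Claim_equal_applay_to_board_bottom := by
  intro board player i j _hDom hPre
  obtain ⟨hi, hrows⟩ := hPre
  have hi0 : 0 ≤ i + 1 := by omega
  have hvalid : ∀ m, i + 1 ≤ m → m < (board.length : Int) → cellAt board j m ≠ none := by
    intro m h1 h2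
    have hm0 : 0 ≤ m := le_trans hi0 h1
    have hmn : m.toNat < board.length := by omega
    have hrow : PySem.List.pyGet? board m = some board[m.toNat] := by
      rw [PySem.List.pyGet?_of_nonneg _ hm0, List.getElem?_eq_getElem hmn]
    have hmem : board[m.toNat] ∈ board.drop (i + 1).toNat := by
      have hlt : m.toNat - (i + 1).toNat < (board.drop (i + 1).toNat).length := by
        simp only [List.length_drop]; omega
      have : board[m.toNat] = (board.drop (i + 1).toNat)[m.toNat - (i + 1).toNat]'hlt := by
        rw [List.getElem_drop]; congr 1; omega
      rw [this]; exact List.getElem_mem _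
    obtain ⟨hj1, hj2⟩ := hrows _ hmem
    unfold cellAt
    rw [hrow]
    simp only [Option.bind_some, Ne, PySem.List.pyGet?_eq_none_iff]
    intro h
    exact h ⟨hj1, hj2⟩
  have hsuf : ((board.length : Int) - (i + 1)).toNat ≤ board.length := by omega
  unfold Spec_applay_to_board_bottom applay_to_board_bottom applay_to_board_bottom_alt
  rw [bLoop_eq player j board.length board (i + 1) [] hi0 hsuf hvalid]
  by_cases hcond : aScan board player j board.length (i + 1) < (board.length : Int) ∧
      cellAt board j (aScan board player j board.length (i + 1)) = some player
  · rw [if_pos hcond, if_pos hcond,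
        aFlip_eq player j board.length board (i + 1) 0 hi0 hsuf hvalid hcond.1 hcond.2]
    simp
  · rw [if_neg hcond, if_neg hcond]
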